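-- pv_equiv track=rewrite | github.com/askanna-io/askanna-backend | askanna_backend/core/utils.py | get_all_directories
-- ===== SOURCE A (Python) =====
-- def get_all_directories(paths: list) -> list:
--     """
--     Get a list of all directories from a list of paths. By unwinding the paths we make sure that all (sub)directories
--     are available in the list of directories we return.
--     """
--
--     directories = []
--     for path in paths:
--         directories.append(path)
--
--         path_parts = path.split("/")
--         while len(path_parts) > 1:
--             path_parts = path_parts[: len(path_parts) - 1]
--             path = "/".join(path_parts)
--             if path and path != "/":
--                 directories.append(path)
--
--     directories = sorted(list(set(directories) - set(["/"]) - set([""])))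
--
--     return directories
-- ===== SOURCE B (Python) =====
-- def get_all_directories(paths: list) -> list:
--     """
--     Get a list of all directories from a list of paths. For each path, the path
--     itself and every prefix ending just before a '/' character are directories;
--     drop '' and '/' and return them sorted.
--     """
--     directories = set()
--     for path in paths:
--         directories.add(path)
--         for i, ch in enumerate(path):
--             if ch == "/":
--                 directories.add(path[:i])
--     directories.discard("")
--     directories.discard("/")
--     return sorted(directories)
-- ===== Notes on version B (the rewrite author's own statement) =====
-- stated objective: simpler
-- what changed: A repeatedly re-splits each path into parts, slices the part list and re-joins it with '/' in a while-loop; B makes one scan over the characters of each path, adding the slice path[:i] for every slash position i (plus the path itself) to a set, then discards '' and '/' and sorts.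
import Mathlib
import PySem

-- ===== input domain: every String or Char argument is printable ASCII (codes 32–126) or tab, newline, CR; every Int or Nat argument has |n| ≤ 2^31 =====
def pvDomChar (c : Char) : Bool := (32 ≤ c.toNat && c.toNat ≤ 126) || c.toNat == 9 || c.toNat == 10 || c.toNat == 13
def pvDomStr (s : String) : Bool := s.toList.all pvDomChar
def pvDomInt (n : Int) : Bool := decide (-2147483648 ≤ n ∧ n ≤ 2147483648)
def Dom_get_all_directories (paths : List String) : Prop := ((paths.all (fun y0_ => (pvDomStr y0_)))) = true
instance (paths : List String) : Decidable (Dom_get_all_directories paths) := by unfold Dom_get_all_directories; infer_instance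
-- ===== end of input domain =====

-- B replaces A's repeated split/slice/join while-loop by a single scan over the
-- slash positions of each path, slicing the original string; objective: simpler.


-- ===== PORT A =====

-- termination fact for A's while loop (cited by name in decreasing_by)
theorem pvA_slice_len {α : Type} (xs : List α) (h : 1 < xs.length) :
    (PySem.List.slice xs none (some ((xs.length : Int) - 1))).length < xs.length := by
  have hc : ((xs.length : Int) - 1) = ((xs.length - 1 : Nat) : Int) := by omega
  rw [hc, PySem.List.slice_to_natCast, List.length_take]
  omega

-- A's 'while len(path_parts) > 1:' loop; acc is the directories list being appended to
def aWhile (path_parts : List String) (acc : List String) : List String :=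
  if h : 1 < path_parts.length then
    let parts' := PySem.List.slice path_parts none (some ((path_parts.length : Int) - 1))
    let path := PySem.Str.join "/" parts'
    aWhile parts' (if path ≠ "" ∧ path ≠ "/" then acc ++ [path] else acc)
  else acc
termination_by path_parts.length
decreasing_by exact pvA_slice_len path_parts h

def get_all_directories (paths : List String) : List String :=
  let directories :=
    paths.foldl (fun acc path =>
      -- path.split("/"): the separator "/" is nonempty, so split? is always `some`
      aWhile ((PySem.Str.split? path "/").getD []) (acc ++ [path])) []
  PySem.List.sorted
    (PySem.Set.diff (PySem.Set.diff (PySem.Set.ofList directories) (PySem.Set.ofList ["/"]))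
      (PySem.Set.ofList [""]))
    (fun x => x) false

-- ===== PORT B =====

def get_all_directories_alt (paths : List String) : List String :=
  let dirs :=
    paths.foldl (fun s path =>
      (PySem.List.enumerate path.toList).foldl
        (fun s ic =>
          if ic.2 == '/' then
            PySem.Set.add s (String.ofList (PySem.Chars.slice path.toList none (some ic.1)))
          else s)
        (PySem.Set.add s path))
      PySem.Set.empty
  PySem.List.sorted ((dirs.discard "").discard "/") (fun x => x) false

-- ===== PRECONDITION & SPEC =====
def Spec_get_all_directories (paths : List String) (out : List String) : Prop := out = get_all_directories_alt paths
instance (paths : List String) (out : List String) : Decidable (Spec_get_all_directories paths out) := by unfold Spec_get_all_directories; infer_instance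

-- ===== CLAIM (what is proved, stated in full; the proofs are below) =====
def Claim_equal_get_all_directories : Prop := ∀ (paths : List String), Dom_get_all_directories paths → Spec_get_all_directories paths (get_all_directories paths)

-- ===== LEMMAS AND PROOFS =====

-- PySem.Chars.splitOn with the single-character separator '/' is Mathlib's splitOnP
theorem pv_go_eq (fuel : Nat) : ∀ (l cur : List Char) (accs : List (List Char)),
    l.length ≤ fuel →
    PySem.Chars.splitOn.go ['/'] fuel l cur accs =
      accs.reverse ++ List.modifyHead (cur.reverse ++ ·) (List.splitOnP (· == '/') l) := by
  induction fuel with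
  | zero =>
    intro l cur accs hl
    have : l = [] := by cases l <;> simp_all
    subst this
    simp [PySem.Chars.splitOn.go, List.splitOnP_nil]
  | succ n ih =>
    intro l cur accs hl
    cases l with
    | nil => simp [PySem.Chars.splitOn.go, List.splitOnP_nil]
    | cons c rest =>
      rw [List.splitOnP_cons]
      by_cases hc : c = '/'
      · subst hc
        rw [show PySem.Chars.splitOn.go ['/'] (n+1) ('/' :: rest) cur accs
              = PySem.Chars.splitOn.go ['/'] n rest [] (cur.reverse :: accs) by
            simp [PySem.Chars.splitOn.go, List.isPrefixOf]]
        rw [ih rest [] (cur.reverse :: accs) (by simp at hl ⊢; omega)]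
        cases h : List.splitOnP (· == '/') rest with
        | nil => exact absurd h (List.splitOnP_ne_nil _ _)
        | cons a t => simp
      · rw [show PySem.Chars.splitOn.go ['/'] (n+1) (c :: rest) cur accs
              = PySem.Chars.splitOn.go ['/'] n rest (c :: cur) accs by
            simp [PySem.Chars.splitOn.go, List.isPrefixOf, Ne.symm hc]]
        rw [ih rest (c :: cur) accs (by simp at hl ⊢; omega)]
        cases h : List.splitOnP (· == '/') rest with
        | nil => exact absurd h (List.splitOnP_ne_nil _ _)
        | cons a t => simp [hc]

theorem pv_splitOn_eq (cs : List Char) :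
    PySem.Chars.splitOn cs ['/'] = List.splitOnP (· == '/') cs := by
  rw [show PySem.Chars.splitOn cs ['/'] = PySem.Chars.splitOn.go ['/'] (cs.length + 1) cs [] [] from rfl]
  rw [pv_go_eq (cs.length + 1) cs [] [] (by omega)]
  cases h : List.splitOnP (· == '/') cs with
  | nil => exact absurd h (List.splitOnP_ne_nil _ _)
  | cons a t => simp

theorem pv_join_cons (c : Char) (h : List Char) (r : List (List Char)) :
    PySem.Chars.join ['/'] ((c :: h) :: r) = c :: PySem.Chars.join ['/'] (h :: r) := by
  cases r with
  | nil => simp [PySem.Chars.join_singleton]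
  | cons q r' => simp [PySem.Chars.join_cons_cons]

theorem pv_key (cs : List Char) : ∀ (x : List Char),
    (∃ k : Nat, 1 ≤ k ∧ k < (List.splitOnP (· == '/') cs).length ∧
      x = PySem.Chars.join ['/'] ((List.splitOnP (· == '/') cs).take k))
    ↔ (∃ i : Nat, i < cs.length ∧ cs[i]? = some '/' ∧ x = cs.take i) := by
  induction cs with
  | nil =>
    intro x
    simp [List.splitOnP_nil]
  | cons c rest ih =>
    intro x
    rw [List.splitOnP_cons]
    by_cases hc : c = '/'
    · subst hc
      simp only [beq_self_eq_true, if_pos]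
      constructor
      · rintro ⟨k, hk1, hk2, hx⟩
        simp only [List.length_cons] at hk2
        match k, hk1 with
        | 1, _ =>
          -- x = join [[]] = []
          refine ⟨0, by simp, by simp, ?_⟩
          simpa [PySem.Chars.join_singleton] using hx
        | (k'+2), _ =>
          have hk' : 1 ≤ k' + 1 ∧ k' + 1 < (List.splitOnP (· == '/') rest).length := by omega
          -- take (k'+2) ([] :: P) = [] :: take (k'+1) P, nonempty
          have hP : ∃ a t, (List.splitOnP (· == '/') rest).take (k'+1) = a :: t := by
            cases h : (List.splitOnP (· == '/') rest).take (k'+1) with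
            | nil =>
              exfalso
              have hlen0 := congrArg List.length h
              rw [List.length_take] at hlen0
              simp only [List.length_nil] at hlen0
              omega
            | cons a t => exact ⟨a, t, rfl⟩
          obtain ⟨a, t, hat⟩ := hP
          have hx' : x = '/' :: PySem.Chars.join ['/'] ((List.splitOnP (· == '/') rest).take (k'+1)) := by
            rw [hx]; simp only [List.take_succ_cons, hat, PySem.Chars.join_cons_cons]; simp
          obtain ⟨i, hi1, hi2, hi3⟩ := (ih _).mp ⟨k'+1, hk'.1, hk'.2, rfl⟩
          exact ⟨i+1, by simpa using hi1, by simpa using hi2, by simp [hx', hi3]⟩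
      · rintro ⟨i, hi1, hi2, hx⟩
        match i with
        | 0 =>
          have hpos : 0 < (List.splitOnP (· == '/') rest).length :=
            List.length_pos_of_ne_nil (List.splitOnP_ne_nil _ _)
          refine ⟨1, le_refl _, by simp only [List.length_cons]; omega, ?_⟩
          simpa [PySem.Chars.join_singleton] using hx
        | (j+1) =>
          simp only [List.getElem?_cons_succ] at hi2
          obtain ⟨k, hk1, hk2, hk3⟩ := (ih _).mpr ⟨j, by simpa using hi1, hi2, rfl⟩
          refine ⟨k+1, by omega, by simp only [List.length_cons]; omega, ?_⟩
          have hP : ∃ a t, (List.splitOnP (· == '/') rest).take k = a :: t := by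
            cases h : (List.splitOnP (· == '/') rest).take k with
            | nil =>
              exfalso
              have hlen0 := congrArg List.length h
              rw [List.length_take] at hlen0
              simp only [List.length_nil] at hlen0
              omega
            | cons a t => exact ⟨a, t, rfl⟩
          obtain ⟨a, t, hat⟩ := hP
          rw [hx]
          simp only [List.take_succ_cons, hat, PySem.Chars.join_cons_cons]
          rw [hat] at hk3
          simp [hk3]
    · -- c ≠ '/'
      have hbeq : (c == '/') = false := by simpa using hc
      simp only [hbeq, if_neg Bool.false_ne_true]
      obtain ⟨h, t, hP⟩ : ∃ h t, List.splitOnP (· == '/') rest = h :: t := by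
        cases hh : List.splitOnP (· == '/') rest with
        | nil => exact absurd hh (List.splitOnP_ne_nil _ _)
        | cons a t => exact ⟨a, t, rfl⟩
      rw [hP]
      simp only [List.modifyHead]
      constructor
      · rintro ⟨k, hk1, hk2, hx⟩
        simp only [List.length_cons] at hk2
        have hx' : x = c :: PySem.Chars.join ['/'] ((h :: t).take k) := by
          match k, hk1 with
          | (k'+1), _ =>
            rw [hx]; simp only [List.take_succ_cons, pv_join_cons]
        obtain ⟨i, hi1, hi2, hi3⟩ := (ih _).mp ⟨k, hk1, by rw [hP]; simpa using hk2, by rw [hP]⟩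
        exact ⟨i+1, by simpa using hi1, by simpa using hi2, by simp [hx', hi3]⟩
      · rintro ⟨i, hi1, hi2, hx⟩
        match i with
        | 0 => simp only [List.getElem?_cons_zero, Option.some.injEq] at hi2; exact absurd hi2 hc
        | (j+1) =>
          simp only [List.getElem?_cons_succ] at hi2
          obtain ⟨k, hk1, hk2, hk3⟩ := (ih _).mpr ⟨j, by simpa using hi1, hi2, rfl⟩
          rw [hP] at hk2 hk3
          refine ⟨k, hk1, by simpa using hk2, ?_⟩
          match k, hk1 with
          | (k'+1), _ =>
            simp only [List.take_succ_cons, pv_join_cons]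
            rw [hx]
            simp only [List.take_succ_cons] at hk3
            simp [hk3]

-- membership in A's while loop output
theorem pv_mem_aWhile_aux (n : Nat) : ∀ (parts acc : List String) (x : String), parts.length ≤ n →
    (x ∈ aWhile parts acc ↔ x ∈ acc ∨ ∃ k : Nat, 1 ≤ k ∧ k < parts.length ∧
      PySem.Str.join "/" (parts.take k) ≠ "" ∧ PySem.Str.join "/" (parts.take k) ≠ "/" ∧
      x = PySem.Str.join "/" (parts.take k)) := by
  induction n with
  | zero =>
    intro parts acc x hn
    have hp : parts = [] := by cases parts <;> simp_all
    subst hp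
    rw [aWhile]
    simp
  | succ n ih =>
    intro parts acc x hn
    rw [aWhile]
    by_cases h1 : 1 < parts.length
    · rw [dif_pos h1]
      have hsl : PySem.List.slice parts none (some ((parts.length : Int) - 1)) = parts.take (parts.length - 1) := by
        have hc : ((parts.length : Int) - 1) = ((parts.length - 1 : Nat) : Int) := by omega
        rw [hc, PySem.List.slice_to_natCast]
      simp only [hsl]
      rw [ih (parts.take (parts.length - 1)) _ x (by rw [List.length_take]; omega)]
      have hlen' : (parts.take (parts.length - 1)).length = parts.length - 1 := by
        rw [List.length_take]; omega
      have htt : ∀ k : Nat, (parts.take (parts.length - 1)).take k = parts.take (min k (parts.length - 1)) := by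
        intro k; rw [List.take_take]
      constructor
      · rintro (hin | ⟨k, hk1, hk2, hc1, hc2, hx⟩)
        · -- x ∈ (if cond then acc ++ [path] else acc)
          by_cases hcnd : PySem.Str.join "/" (parts.take (parts.length - 1)) ≠ "" ∧ PySem.Str.join "/" (parts.take (parts.length - 1)) ≠ "/"
          · rw [if_pos hcnd] at hin
            rcases List.mem_append.mp hin with h | h
            · exact Or.inl h
            · simp only [List.mem_singleton] at h
              exact Or.inr ⟨parts.length - 1, by omega, by omega, hcnd.1, hcnd.2, h⟩
          · rw [if_neg hcnd] at hin
            exact Or.inl hin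
        · rw [hlen'] at hk2
          rw [htt, Nat.min_eq_left (by omega)] at hc1 hc2 hx
          exact Or.inr ⟨k, hk1, by omega, hc1, hc2, hx⟩
      · rintro (hin | ⟨k, hk1, hk2, hc1, hc2, hx⟩)
        · left
          by_cases hcnd : PySem.Str.join "/" (parts.take (parts.length - 1)) ≠ "" ∧ PySem.Str.join "/" (parts.take (parts.length - 1)) ≠ "/"
          · rw [if_pos hcnd]; exact List.mem_append.mpr (Or.inl hin)
          · rw [if_neg hcnd]; exact hin
        · by_cases hk : k = parts.length - 1
          · subst hk
            left
            rw [if_pos ⟨hc1, hc2⟩]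
            exact List.mem_append.mpr (Or.inr (by simp [hx]))
          · right
            refine ⟨k, hk1, ?_, ?_, ?_, ?_⟩
            · rw [hlen']; omega
            · rw [htt, Nat.min_eq_left (by omega)]; exact hc1
            · rw [htt, Nat.min_eq_left (by omega)]; exact hc2
            · rw [htt, Nat.min_eq_left (by omega)]; exact hx
    · rw [dif_neg h1]
      constructor
      · exact Or.inl
      · rintro (hin | ⟨k, hk1, hk2, _⟩)
        · exact hin
        · omega

theorem pv_mem_aWhile (parts : List String) (acc : List String) (x : String) :
    x ∈ aWhile parts acc ↔ x ∈ acc ∨ ∃ k : Nat, 1 ≤ k ∧ k < parts.length ∧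
      PySem.Str.join "/" (parts.take k) ≠ "" ∧ PySem.Str.join "/" (parts.take k) ≠ "/" ∧
      x = PySem.Str.join "/" (parts.take k) :=
  pv_mem_aWhile_aux parts.length parts acc x (le_refl _)

-- membership in A's directories list
theorem pv_mem_adirs (paths : List String) (acc : List String) (x : String) :
    x ∈ paths.foldl (fun acc path =>
        aWhile ((PySem.Str.split? path "/").getD []) (acc ++ [path])) acc
    ↔ x ∈ acc ∨ ∃ p ∈ paths, x = p ∨ ∃ k : Nat, 1 ≤ k ∧
        k < (((PySem.Str.split? p "/").getD []) : List String).length ∧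
        PySem.Str.join "/" (((PySem.Str.split? p "/").getD []).take k) ≠ "" ∧
        PySem.Str.join "/" (((PySem.Str.split? p "/").getD []).take k) ≠ "/" ∧
        x = PySem.Str.join "/" (((PySem.Str.split? p "/").getD []).take k) := by
  induction paths generalizing acc with
  | nil => simp
  | cons p rest ih =>
    simp only [List.foldl_cons]
    rw [ih, pv_mem_aWhile]
    simp only [List.exists_mem_cons_iff, List.mem_append, List.mem_singleton]
    simp only [or_assoc]

-- membership in B's inner loop over the slash positions of one path
theorem pv_mem_bloop (g : Int → String) (x : String) :
    ∀ (l : List (Int × Char)) (s : PySem.Set String),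
    x ∈ l.foldl (fun s ic => if ic.2 == '/' then PySem.Set.add s (g ic.1) else s) s
    ↔ x ∈ s ∨ ∃ ic ∈ l, ic.2 = '/' ∧ x = g ic.1 := by
  intro l
  induction l with
  | nil => simp
  | cons ic rest ih =>
    intro s
    simp only [List.foldl_cons, List.exists_mem_cons_iff]
    by_cases hc : ic.2 = '/'
    · rw [if_pos (by simpa using hc), ih, PySem.Set.mem_add]
      tauto
    · rw [if_neg (by simpa using hc), ih]
      tauto

-- membership in B's set of directories
theorem pv_mem_bdirs (paths : List String) (s : PySem.Set String) (x : String) :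
    x ∈ paths.foldl (fun s path =>
        (PySem.List.enumerate path.toList).foldl
          (fun s ic =>
            if ic.2 == '/' then
              PySem.Set.add s (String.ofList (PySem.Chars.slice path.toList none (some ic.1)))
            else s)
          (PySem.Set.add s path)) s
    ↔ x ∈ s ∨ ∃ p ∈ paths, x = p ∨ ∃ i : Nat, i < p.toList.length ∧
        p.toList[i]? = some '/' ∧ x = String.ofList (p.toList.take i) := by
  induction paths generalizing s with
  | nil => simp
  | cons p rest ih =>
    simp only [List.foldl_cons, List.exists_mem_cons_iff]
    rw [ih, pv_mem_bloop (fun i => String.ofList (PySem.Chars.slice p.toList none (some i))) x, PySem.Set.mem_add]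
    have henum : (∃ ic ∈ PySem.List.enumerate p.toList 0, ic.2 = '/' ∧
        x = String.ofList (PySem.Chars.slice p.toList none (some ic.1)))
        ↔ ∃ i : Nat, i < p.toList.length ∧ p.toList[i]? = some '/' ∧
          x = String.ofList (p.toList.take i) := by
      constructor
      · rintro ⟨ic, hmem, hslash, hx⟩
        obtain ⟨k, hk, hic⟩ := (PySem.List.mem_enumerate_iff _ _ _).mp hmem
        subst hic
        refine ⟨k, hk, ?_, ?_⟩
        · rw [List.getElem?_eq_getElem hk]
          simpa using hslash
        · rw [hx]
          simp only [zero_add, PySem.Chars.slice_eq_listSlice, PySem.List.slice_to_natCast]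
      · rintro ⟨i, hi, hslash, hx⟩
        refine ⟨((i : Int), p.toList[i]), (PySem.List.mem_enumerate_iff _ _ _).mpr ⟨i, hi, by simp⟩, ?_, ?_⟩
        · rw [List.getElem?_eq_getElem hi] at hslash
          simpa using hslash
        · rw [hx]
          simp only [PySem.Chars.slice_eq_listSlice, PySem.List.slice_to_natCast]
    rw [henum]
    simp only [or_assoc]

-- B's inner loop keeps the set duplicate-free
theorem pv_nodup_bloop (g : Int → String) :
    ∀ (l : List (Int × Char)) (s : PySem.Set String), s.Nodup →
    (l.foldl (fun s ic => if ic.2 == '/' then PySem.Set.add s (g ic.1) else s) s).Nodup := by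
  intro l
  induction l with
  | nil => intro s hs; exact hs
  | cons ic rest ih =>
    intro s hs
    simp only [List.foldl_cons]
    by_cases hc : ic.2 == '/'
    · rw [if_pos hc]; exact ih _ (PySem.Set.nodup_add _ _ hs)
    · rw [if_neg hc]; exact ih _ hs

-- B's set is duplicate-free
theorem pv_nodup_bdirs (paths : List String) (s : PySem.Set String) (h : s.Nodup) :
    (paths.foldl (fun s path =>
        (PySem.List.enumerate path.toList).foldl
          (fun s ic =>
            if ic.2 == '/' then
              PySem.Set.add s (String.ofList (PySem.Chars.slice path.toList none (some ic.1)))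
            else s)
          (PySem.Set.add s path)) s).Nodup := by
  induction paths generalizing s with
  | nil => exact h
  | cons p rest ih =>
    simp only [List.foldl_cons]
    exact ih _ (pv_nodup_bloop (fun i => String.ofList (PySem.Chars.slice p.toList none (some i)))
      (PySem.List.enumerate p.toList) _ (PySem.Set.nodup_add _ _ h))

-- the per-path contributions of A and of B are the same strings (away from "" and "/")
theorem pv_split_getD (p : String) :
    ((PySem.Str.split? p "/").getD []) = (List.splitOnP (· == '/') p.toList).map String.ofList := by
  have hsep : ("/" : String).toList = ['/'] := rfl
  simp [PySem.Str.split?, PySem.Chars.split?, hsep, pv_splitOn_eq]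

theorem pv_join_toList (S : List (List Char)) :
    (PySem.Str.join "/" (S.map String.ofList)).toList = PySem.Chars.join ['/'] S := by
  have hsep : ("/" : String).toList = ['/'] := rfl
  rw [PySem.Str.toList_join, hsep, List.map_map]
  simp [Function.comp_def, String.toList_ofList]

theorem pv_contrib (p x : String) (hx0 : x ≠ "") (hx1 : x ≠ "/") :
    (x = p ∨ ∃ k : Nat, 1 ≤ k ∧
        k < (((PySem.Str.split? p "/").getD []) : List String).length ∧
        PySem.Str.join "/" (((PySem.Str.split? p "/").getD []).take k) ≠ "" ∧
        PySem.Str.join "/" (((PySem.Str.split? p "/").getD []).take k) ≠ "/" ∧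
        x = PySem.Str.join "/" (((PySem.Str.split? p "/").getD []).take k))
    ↔ (x = p ∨ ∃ i : Nat, i < p.toList.length ∧
        p.toList[i]? = some '/' ∧ x = String.ofList (p.toList.take i)) := by
  constructor
  · rintro (h | ⟨k, hk1, hk2, _, _, hx⟩)
    · exact Or.inl h
    · right
      rw [pv_split_getD] at hk2 hx
      have hlen : k < (List.splitOnP (· == '/') p.toList).length := by simpa using hk2
      have hxl : x.toList = PySem.Chars.join ['/'] ((List.splitOnP (· == '/') p.toList).take k) := by
        rw [hx, ← List.map_take, pv_join_toList]
      obtain ⟨i, hi1, hi2, hi3⟩ := (pv_key p.toList x.toList).mp ⟨k, hk1, hlen, hxl⟩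
      refine ⟨i, hi1, hi2, ?_⟩
      rw [String.ext_iff, String.toList_ofList]
      exact hi3
  · rintro (h | ⟨i, hi1, hi2, hx⟩)
    · exact Or.inl h
    · right
      have hxl : x.toList = p.toList.take i := by rw [hx, String.toList_ofList]
      obtain ⟨k, hk1, hk2, hk3⟩ := (pv_key p.toList x.toList).mpr ⟨i, hi1, hi2, hxl⟩
      have hJx : PySem.Str.join "/" (((PySem.Str.split? p "/").getD []).take k) = x := by
        rw [String.ext_iff, pv_split_getD, ← List.map_take, pv_join_toList]
        exact hk3.symm
      refine ⟨k, hk1, ?_, ?_, ?_, ?_⟩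
      · rw [pv_split_getD]; simpa using hk2
      · rw [hJx]; exact hx0
      · rw [hJx]; exact hx1
      · exact hJx.symm

-- ===== VERDICT (by name: the statement is the Claim_ definition above) =====
theorem get_all_directories_spec : Claim_equal_get_all_directories := by
  unfold Claim_equal_get_all_directories Spec_get_all_directories
  intro paths _
  simp only [get_all_directories, get_all_directories_alt]
  rw [PySem.List.sorted_id_eq_sorted_id_iff_perm]
  have hA : (PySem.Set.diff (PySem.Set.diff (PySem.Set.ofList
      (paths.foldl (fun acc path =>
        aWhile ((PySem.Str.split? path "/").getD []) (acc ++ [path])) []))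
      (PySem.Set.ofList ["/"])) (PySem.Set.ofList [""])).Nodup :=
    PySem.Set.nodup_diff _ _ (PySem.Set.nodup_diff _ _ (PySem.Set.nodup_ofList _))
  have hB : ((((paths.foldl (fun s path =>
        (PySem.List.enumerate path.toList).foldl
          (fun s ic =>
            if ic.2 == '/' then
              PySem.Set.add s (String.ofList (PySem.Chars.slice path.toList none (some ic.1)))
            else s)
          (PySem.Set.add s path)) PySem.Set.empty).discard "").discard "/")).Nodup :=
    PySem.Set.nodup_discard _ _ (PySem.Set.nodup_discard _ _
      (pv_nodup_bdirs paths PySem.Set.empty List.nodup_nil))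
  rw [List.perm_ext_iff_of_nodup hA hB]
  intro a
  rw [PySem.Set.mem_diff, PySem.Set.mem_diff, PySem.Set.mem_ofList,
    PySem.Set.mem_discard, PySem.Set.mem_discard]
  rw [pv_mem_adirs, pv_mem_bdirs]
  simp only [PySem.Set.mem_ofList, List.mem_singleton, List.not_mem_nil, false_or]
  constructor
  · rintro ⟨⟨hex, h1⟩, h2⟩
    obtain ⟨p, hp, hc⟩ := hex
    exact ⟨⟨Or.inr ⟨p, hp, (pv_contrib p a h2 h1).mp hc⟩, h2⟩, h1⟩
  · rintro ⟨⟨hex, h2⟩, h1⟩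
    rcases hex with hemp | ⟨p, hp, hc⟩
    · exact absurd hemp (by simp [PySem.Set.empty])
    · exact ⟨⟨⟨p, hp, (pv_contrib p a h2 h1).mpr hc⟩, h1⟩, h2⟩
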